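-- pv_equiv track=rewrite | github.com/MK-Lee13/Algorithm-Study | Bak-joon/10815.py | solution
-- ===== SOURCE A (Python) =====
-- def solution(n, k, match_card, my_card):
--   answer = []
--   for key in my_card:
--     if key in match_card:
--       answer.append(1)
--     else:
--       answer.append(0)
--   return answer
-- ===== SOURCE B (Python) =====
-- def solution(n, k, match_card, my_card):
--     s = sorted(match_card)
--
--     def found(key):
--         lo, hi = 0, len(s)
--         while lo < hi:
--             mid = (lo + hi) // 2
--             if s[mid] < key:
--                 lo = mid + 1
--             else:
--                 hi = mid
--         return 1 if lo < len(s) and s[lo] == key else 0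
--
--     return [found(key) for key in my_card]
-- ===== Notes on version B (the rewrite author's own statement) =====
-- stated objective: faster
-- what changed: Sorts a copy of match_card once and answers each query by a hand-written binary search (bisect_left) through a helper mapped over my_card, instead of A's per-query linear membership scan with an appended accumulator.
import Mathlib
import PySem

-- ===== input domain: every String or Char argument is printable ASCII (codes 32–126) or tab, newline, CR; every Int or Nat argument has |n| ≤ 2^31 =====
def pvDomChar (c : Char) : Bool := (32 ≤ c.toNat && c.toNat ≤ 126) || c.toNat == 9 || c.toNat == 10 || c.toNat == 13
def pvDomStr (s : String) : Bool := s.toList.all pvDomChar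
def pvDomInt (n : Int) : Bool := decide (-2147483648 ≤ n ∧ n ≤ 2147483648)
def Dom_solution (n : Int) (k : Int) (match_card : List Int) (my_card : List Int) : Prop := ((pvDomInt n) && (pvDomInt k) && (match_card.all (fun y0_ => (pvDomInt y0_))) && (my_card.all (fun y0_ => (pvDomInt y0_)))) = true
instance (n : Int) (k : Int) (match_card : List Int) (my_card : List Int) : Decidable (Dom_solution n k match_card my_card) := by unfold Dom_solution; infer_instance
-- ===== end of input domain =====

-- B sorts a copy of match_card once and answers each query by binary search via a
-- mapped helper (objective: faster); neither version mutates its arguments.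

-- ===== PORT A =====
def solution (n : Int) (k : Int) (match_card : List Int) (my_card : List Int) : List Int :=
  my_card.foldl (fun answer key =>
    if match_card.contains key then answer ++ [(1 : Int)] else answer ++ [(0 : Int)]) []

-- ===== PORT B =====
-- Source B's inner while loop is exactly Python's bisect_left; PySem.List.bisectLeft is
-- that loop (lo/hi halving with mid = (lo+hi)//2, s[mid] < key ? lo := mid+1 : hi := mid).
def bFound (s : List Int) (key : Int) : Int :=
  let lo := PySem.List.bisectLeft s key
  if lo < s.length ∧ s.getD lo 0 = key then 1 else 0

def solution_alt (n : Int) (k : Int) (match_card : List Int) (my_card : List Int) : List Int :=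
  let s := PySem.List.sorted match_card (fun x => x) false
  my_card.map (bFound s)

-- ===== PRECONDITION & SPEC =====
def Spec_solution (n : Int) (k : Int) (match_card : List Int) (my_card : List Int) (out : List Int) : Prop := out = solution_alt n k match_card my_card
instance (n : Int) (k : Int) (match_card : List Int) (my_card : List Int) (out : List Int) : Decidable (Spec_solution n k match_card my_card out) := by unfold Spec_solution; infer_instance

-- ===== CLAIM (what is proved, stated in full; the proofs are below) =====
def Claim_equal_solution : Prop := ∀ (n : Int) (k : Int) (match_card : List Int) (my_card : List Int), Dom_solution n k match_card my_card → Spec_solution n k match_card my_card (solution n k match_card my_card)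

-- ===== LEMMAS AND PROOFS =====

-- Appending one mapped element per step is List.map.
theorem foldl_append_map (f : Int → Int) (xs : List Int) (a0 : List Int) :
    xs.foldl (fun acc x => acc ++ [f x]) a0 = a0 ++ xs.map f := by
  induction xs generalizing a0 with
  | nil => simp
  | cons x xs ih => simp [List.foldl, ih, List.append_assoc]

-- The bisect probe on the sorted copy decides membership in match_card.
theorem bFound_eq_contains (mc : List Int) (key : Int) :
    bFound (PySem.List.sorted mc (fun x => x) false) key =
      (if mc.contains key then (1 : Int) else 0) := by
  have hpw : List.Pairwise (fun a b : Int => a ≤ b) (PySem.List.sorted mc (fun x => x) false) :=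
    PySem.List.sorted_pairwise mc (fun x => x)
  obtain ⟨hle, hlt, hge⟩ := PySem.List.bisectLeft_spec (PySem.List.sorted mc (fun x => x) false) key hpw
  unfold bFound
  set s := PySem.List.sorted mc (fun x => x) false with hs
  set lo := PySem.List.bisectLeft s key with hlo
  have hmem : key ∈ s ↔ key ∈ mc := (PySem.List.sorted_perm mc (fun x => x) false).mem_iff
  by_cases hin : mc.contains key
  · -- key occurs in mc, hence in s at some index j; then lo ≤ j and s[lo] = key
    have hk : key ∈ s := hmem.mpr (List.contains_iff_mem.mp hin)
    obtain ⟨j, hj, hsj⟩ := List.getElem_of_mem hk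
    have hjlo : lo ≤ j := by
      by_contra h
      have := hlt j hj (by omega)
      omega
    have hlolen : lo < s.length := lt_of_le_of_lt hjlo hj
    have h1 : key ≤ s[lo] := hge lo hlolen le_rfl
    have h2 : s[lo] ≤ s[j] := PySem.List.sorted_id_getElem_mono mc hjlo hj
    have heq : s[lo] = key := le_antisymm (hsj ▸ h2) h1
    rw [if_pos hin, if_pos ⟨hlolen, by rw [List.getD_eq_getElem _ _ hlolen]; exact heq⟩]
  · -- key is not in mc, so it is not in s, so the probe cannot hit it
    rw [if_neg hin, if_neg]
    rintro ⟨hlolen, hget⟩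
    rw [List.getD_eq_getElem _ _ hlolen] at hget
    exact hin (List.contains_iff_mem.mpr (hmem.mp (hget ▸ List.getElem_mem hlolen)))

-- ===== VERDICT (by name: the statement is the Claim_ definition above) =====
theorem solution_spec : Claim_equal_solution := by
  intro n k mc my _
  unfold Spec_solution solution solution_alt
  simp only []
  rw [show (fun (answer : List Int) (key : Int) =>
    if mc.contains key then answer ++ [(1:Int)] else answer ++ [(0:Int)]) =
    (fun answer key => answer ++ [if mc.contains key then (1:Int) else 0]) from by
      funext a key; split <;> rfl]
  rw [foldl_append_map]
  simp only [List.nil_append]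
  apply List.map_congr_left
  intro key _
  exact (bFound_eq_contains mc key).symm
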